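-- pv_equiv track=rewrite | github.com/tolen-kangleicha/DAA | lab/2.2_find_min_dac.py | find_min_dnc
-- ===== SOURCE A (Python) =====
-- def find_min_dnc(arr, comparison_count=0):
--     """
--     Method to find the minimum value and count comparisons.
--     """
--     if len(arr) == 1:  # Base case
--         return arr[0], comparison_count
--     mid = len(arr) // 2  # Find midpoint
--     l1 = arr[:mid]  # Left sublist
--     l2 = arr[mid:]  # Right sublist
--     min1, comparison_count = find_min_dnc(l1, comparison_count)  # Recursive call on L1
--     min2, comparison_count = find_min_dnc(l2, comparison_count)  # Recursive call on L2
--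
--     comparison_count += 1  # Count the comparison
--     return (min1 if min1 < min2 else min2), comparison_count  # Combine results
-- ===== SOURCE B (Python) =====
-- def find_min_dnc(arr, comparison_count=0):
--     """
--     Iterative single pass: same minimum and same comparison count (n-1 added).
--     """
--     m = arr[0]
--     for x in arr[1:]:
--         comparison_count += 1
--         if x < m:
--             m = x
--     return m, comparison_count
-- ===== Notes on version B (the rewrite author's own statement) =====
-- stated objective: faster
-- what changed: Replaces the divide-and-conquer recursion (which copies the list via slicing at every level) with a single iterative left-to-right scan keeping the running minimum and adding one comparison per remaining element.
import Mathlib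
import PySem

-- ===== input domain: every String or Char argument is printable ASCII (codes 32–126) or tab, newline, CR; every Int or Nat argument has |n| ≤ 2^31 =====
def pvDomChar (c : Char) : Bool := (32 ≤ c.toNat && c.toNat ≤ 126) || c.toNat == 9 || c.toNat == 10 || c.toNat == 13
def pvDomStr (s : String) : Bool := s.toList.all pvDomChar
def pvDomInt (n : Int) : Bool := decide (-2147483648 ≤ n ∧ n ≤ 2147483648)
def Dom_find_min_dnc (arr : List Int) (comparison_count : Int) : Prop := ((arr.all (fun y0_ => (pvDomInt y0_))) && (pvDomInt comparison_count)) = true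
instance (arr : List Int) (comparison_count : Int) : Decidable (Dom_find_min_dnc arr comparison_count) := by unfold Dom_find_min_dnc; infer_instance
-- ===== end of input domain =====

-- B replaces A's divide-and-conquer minimum search by a single iterative left fold
-- (same minimum, same comparison count), avoiding recursion and slice copies; objective: faster.


-- ===== PORT A =====
-- Literal port of A's divide-and-conquer. On [] the Python recurses forever
-- (RecursionError); the `arr.length = 0` guard only makes the Lean function total
-- there ([] is outside Pre_). arr[:mid] / arr[mid:] with 0 ≤ mid ≤ len are
-- exactly take/drop.
def find_min_dnc (arr : List Int) (comparison_count : Int) : Int × Int :=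
  if _h1 : arr.length = 1 then (arr.headD 0, comparison_count)
  else if _h0 : arr.length = 0 then (0, comparison_count)  -- totality guard: Python diverges here
  else
    let mid := arr.length / 2
    let p1 := find_min_dnc (arr.take mid) comparison_count
    let p2 := find_min_dnc (arr.drop mid) p1.2
    ((if p1.1 < p2.1 then p1.1 else p2.1), p2.2 + 1)
termination_by arr.length
decreasing_by
  · simp; omega
  · simp; omega

-- ===== PORT B =====
-- Literal port of Source B: m = arr[0]; fold over arr[1:] counting one comparison per step.
-- On [] the Python raises IndexError ([] is outside Pre_).
def find_min_dnc_alt (arr : List Int) (comparison_count : Int) : Int × Int :=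
  match arr with
  | [] => (0, comparison_count)  -- Python: IndexError on arr[0]; outside Pre_
  | x :: rest =>
    rest.foldl (fun s y => ((if y < s.1 then y else s.1), s.2 + 1)) (x, comparison_count)

-- ===== PRECONDITION & SPEC =====
-- Pre_ excludes only the empty list, on which A raises RecursionError (and B IndexError).
def Pre_find_min_dnc (arr : List Int) (comparison_count : Int) : Prop := arr ≠ []
instance (arr : List Int) (comparison_count : Int) : Decidable (Pre_find_min_dnc arr comparison_count) := by unfold Pre_find_min_dnc; infer_instance
def pvWitness_find_min_dnc : List Int × Int := ([3, 1, 2], 0)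

def Spec_find_min_dnc (arr : List Int) (comparison_count : Int) (out : Int × Int) : Prop := out = find_min_dnc_alt arr comparison_count
instance (arr : List Int) (comparison_count : Int) (out : Int × Int) : Decidable (Spec_find_min_dnc arr comparison_count out) := by unfold Spec_find_min_dnc; infer_instance

-- ===== CLAIM (what is proved, stated in full; the proofs are below) =====
def Claim_equal_find_min_dnc : Prop := ∀ (arr : List Int) (comparison_count : Int), Dom_find_min_dnc arr comparison_count → Pre_find_min_dnc arr comparison_count → Spec_find_min_dnc arr comparison_count (find_min_dnc arr comparison_count)

-- ===== LEMMAS AND PROOFS =====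

-- folding `min` distributes over a seeded minimum
theorem foldl_min_min (l : List Int) (a b : Int) :
    l.foldl min (min a b) = min a (l.foldl min b) := by
  induction l generalizing b with
  | nil => simp
  | cons y t ih => simp [List.foldl, min_assoc, ih]

-- both ports compute (foldl min x rest, c + rest.length)
theorem alt_closed (x : Int) (rest : List Int) (c : Int) :
    find_min_dnc_alt (x :: rest) c = (rest.foldl min x, c + rest.length) := by
  induction rest generalizing x c with
  | nil => simp [find_min_dnc_alt]
  | cons y t ih =>
    simp only [find_min_dnc_alt] at ih ⊢
    simp only [List.foldl]
    rw [ih]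
    have hmin : (if y < x then y else x) = min x y := by
      rcases lt_or_ge y x with h | h
      · simp [le_of_lt h, if_pos h]
      · simp [h, not_lt.mpr h]
    rw [hmin, Prod.mk.injEq]
    refine ⟨rfl, ?_⟩
    simp only [List.length_cons]
    push_cast; ring

theorem a_closed (n : Nat) : ∀ (arr : List Int) (c : Int), arr.length = n → arr ≠ [] →
    find_min_dnc arr c = (arr.tail.foldl min (arr.headD 0), c + arr.length - 1) := by
  induction n using Nat.strong_induction_on with
  | _ n ih =>
    intro arr c hn hne
    rw [find_min_dnc]
    by_cases h1 : arr.length = 1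
    · obtain ⟨x, rfl⟩ : ∃ x, arr = [x] := List.length_eq_one_iff.mp h1
      simp
    · have h0 : ¬ arr.length = 0 := by simpa using hne
      simp only [dif_neg h1, dif_neg h0]
      have hm1 : 1 ≤ arr.length / 2 := by omega
      have hmlt : arr.length / 2 < arr.length := by omega
      have ht : arr.take (arr.length / 2) ≠ [] := by
        rw [Ne, List.take_eq_nil_iff]
        exact not_or.mpr ⟨by omega, hne⟩
      have hd : arr.drop (arr.length / 2) ≠ [] := by
        rw [Ne, List.drop_eq_nil_iff]
        omega
      have e1 := ih (arr.take (arr.length / 2)).length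
        (by rw [List.length_take, Nat.min_eq_left (Nat.le_of_lt hmlt)]; exact hmlt.trans_le hn.le)
        (arr.take (arr.length / 2)) c rfl ht
      rw [e1]
      have e2 := ih (arr.drop (arr.length / 2)).length
        (by rw [List.length_drop]; omega) (arr.drop (arr.length / 2))
        (c + ((arr.take (arr.length / 2)).length : Int) - 1) rfl hd
      rw [e2]
      obtain ⟨a, l1, h1e⟩ : ∃ a l1, arr.take (arr.length / 2) = a :: l1 :=
        List.exists_cons_of_ne_nil ht
      obtain ⟨b, l2, h2e⟩ : ∃ b l2, arr.drop (arr.length / 2) = b :: l2 :=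
        List.exists_cons_of_ne_nil hd
      have happ : arr.take (arr.length / 2) ++ arr.drop (arr.length / 2) = arr :=
        List.take_append_drop _ _
      have hlen : (arr.take (arr.length / 2)).length + (arr.drop (arr.length / 2)).length
          = arr.length := by
        conv_rhs => rw [← happ]
        rw [List.length_append]
      obtain ⟨x, t, hxe⟩ : ∃ x t, arr = x :: t := List.exists_cons_of_ne_nil hne
      have hx : a = x ∧ l1 ++ b :: l2 = t := by
        rw [h1e, h2e, hxe] at happ; simpa using happ
      rw [Prod.mk.injEq]
      constructor
      · -- minimum component
        rw [h1e, h2e]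
        simp only [List.headD_cons, List.tail_cons]
        rw [hxe]
        simp only [List.headD_cons, List.tail_cons]
        rw [← hx.2, ← hx.1, List.foldl_append]
        have key : (b :: l2).foldl min (l1.foldl min a) =
            min (l1.foldl min a) (l2.foldl min b) := by
          simp only [List.foldl]
          exact foldl_min_min l2 (l1.foldl min a) b
        rw [key]
        rcases lt_or_ge (l1.foldl min a) (l2.foldl min b) with hlt | hge
        · simp [le_of_lt hlt, if_pos hlt]
        · simp [hge, not_lt.mpr hge]
      · -- count component
        rw [h1e, h2e] at hlen
        simp only [List.length_cons] at hlen ⊢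
        simp only [h1e, h2e, List.length_cons]
        push_cast
        omega

-- ===== VERDICT (by name: the statement is the Claim_ definition above) =====
theorem find_min_dnc_spec : Claim_equal_find_min_dnc := by
  intro arr c _ hpre
  obtain ⟨x, t, rfl⟩ : ∃ x t, arr = x :: t := List.exists_cons_of_ne_nil hpre
  unfold Spec_find_min_dnc
  rw [a_closed (x :: t).length _ _ rfl hpre, alt_closed]
  simp only [List.headD_cons, List.tail_cons, List.length_cons, Prod.mk.injEq]
  refine ⟨trivial, ?_⟩
  push_cast
  ring
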